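-- pv_equiv track=rewrite | github.com/koeppl/lzw-sensitivity | lzw_generate.py | construct_T_int
-- ===== SOURCE A (Python) =====
-- SENTINEL: int = 999
--
-- def compute_l_j(j: int) -> int:
--     """Return L_j, the smallest L such that L*(L+1)/2 >= j.
--
--     Args:
--         j: Block index (1-based).
--
--     Returns:
--         The smallest positive integer L satisfying L*(L+1)//2 >= j.
--     """
--     L = 1
--     while (L * (L + 1)) // 2 < j:
--         L += 1
--     return L
--
-- def compute_y_j(j: int, k: int) -> tuple[int, int]:
--     """Return (y_j, L_j) for the j-th repetition block.
--
--     Args: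
--         j: Block index (1-based).
--         k: Sequence size parameter.
--
--     Returns:
--         A tuple ``(y_j, L_j)`` where y_j is the largest candidate in 1..k
--         whose residue modulo L_j equals (2+j+L_j-1) mod L_j.
--     """
--     L = compute_l_j(j)
--     residue = (2 + j + L - 1) % L
--     candidates = [y for y in range(1, k + 1) if y % L == residue]
--     return max(candidates), L
--
-- def construct_T_int(k: int, substitute: str) -> list[int]:
--     """Construct the LZW test sequence T (or a 1-edit variant) as an integer list.
--
--     ``sigma_i`` is encoded as integer ``i``.  The edit sentinel is ``SENTINEL``.
--
--     Part (1): for i = 1..k emit [1, 2, ..., i, k+i].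
--     Part (2): for j = 1..k emit core + [2k+j] + core, where
--               core = [1, ..., y_j, k+j].
--               When ``substitute != 'none'`` the first occurrence of core
--               (at j == 1) is replaced according to the edit type.
--
--     Args:
--         k:          Sequence size parameter (positive integer).
--         substitute: Edit to apply to the first core of part (2).
--                     One of ``'none'``, ``'insert'``, ``'delete'``,
--                     ``'substitute'``.
--
--     Returns:
--         A list of integers representing T (or its edited variant).
--     """
--     # Part (1)
--     part1: list[int] = []
--     for i in range(1, k + 1):
--         part1.extend(range(1, i + 1))
--         part1.append(k + i)
--
--     # Part (2)
--     part2: list[int] = []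
--     for j in range(1, k + 1):
--         yj, _Lj = compute_y_j(j, k)
--         core: list[int] = list(range(1, yj + 1)) + [k + j]
--
--         if substitute != "none" and j == 1:
--             # Apply the requested 1-edit to the first core only
--             if substitute == "insert":
--                 first_core: list[int] = [core[0], SENTINEL] + core[1:]
--             elif substitute == "delete":
--                 first_core = core[1:]
--             else:  # substitute == 'substitute'
--                 first_core = [SENTINEL] + core[1:]
--             part2.extend(first_core)
--             part2.append(2 * k + j)
--             part2.extend(core)
--         else:
--             part2.extend(core)
--             part2.append(2 * k + j)
--             part2.extend(core)
--
--     return part1 + part2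
-- ===== SOURCE B (Python) =====
-- SENTINEL: int = 999
--
-- def construct_T_int(k: int, substitute: str) -> list[int]:
--     # Part (1): grow the prefix [1..i] incrementally instead of rebuilding range(1, i+1) each time.
--     part1: list[int] = []
--     prefix: list[int] = []
--     for i in range(1, k + 1):
--         prefix.append(i)
--         part1 += prefix
--         part1.append(k + i)
--
--     # Part (2): maintain L_j incrementally (L_j grows by at most 1 per step; t == L*(L+1)//2)
--     # and compute y_j in closed form as the largest value <= k congruent to (j+1) mod L.
--     part2: list[int] = []
--     L = 1
--     t = 1
--     for j in range(1, k + 1):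
--         if t < j:
--             L += 1
--             t += L
--         residue = (1 + j) % L
--         yj = k - ((k - residue) % L)
--         core = list(range(1, yj + 1)) + [k + j]
--         if j == 1 and substitute != "none":
--             if substitute == "delete":
--                 part2 += core[1:]
--             elif substitute == "insert":
--                 part2 += [core[0], SENTINEL] + core[1:]
--             else:
--                 part2 += [SENTINEL] + core[1:]
--         else:
--             part2 += core
--         part2.append(2 * k + j)
--         part2 += core
--     return part1 + part2
-- ===== Notes on version B (the rewrite author's own statement) =====
-- stated objective: alternative
-- what changed: B replaces A's two per-iteration rescans - compute_l_j's while-loop from 1 and compute_y_j's O(k) candidate-list-plus-max scan - by incremental maintenance of L_j (it grows by at most 1 per step, with its triangular number carried along) and a closed-form y_j = k - ((k - (1+j) % L) % L), and grows part1's prefix [1..i] incrementally instead of rebuilding range(1, i+1) each iteration.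
import Mathlib
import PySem

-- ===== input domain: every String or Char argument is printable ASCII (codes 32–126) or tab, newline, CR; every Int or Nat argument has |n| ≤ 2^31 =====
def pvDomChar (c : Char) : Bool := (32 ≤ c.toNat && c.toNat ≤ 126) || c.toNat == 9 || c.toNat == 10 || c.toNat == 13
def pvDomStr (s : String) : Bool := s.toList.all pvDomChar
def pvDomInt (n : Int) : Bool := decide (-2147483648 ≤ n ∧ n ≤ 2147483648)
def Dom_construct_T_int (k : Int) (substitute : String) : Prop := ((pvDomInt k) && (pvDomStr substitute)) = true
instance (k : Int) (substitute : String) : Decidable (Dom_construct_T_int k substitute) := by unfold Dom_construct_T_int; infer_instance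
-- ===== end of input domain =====

-- B replaces A's per-j re-scan helpers by incremental maintenance of L_j and a closed-form y_j
-- (and grows part1's prefix incrementally); an alternative computation with the same return value.

-- ===== PORT A =====
def SENTINEL : Int := 999

def compute_l_j_loop (j L : Int) : Int :=
  if PySem.Int.floordiv (L * (L + 1)) 2 < j then compute_l_j_loop j (L + 1) else L
termination_by (2 * j - L).toNat
decreasing_by
  rename_i h
  have h2 : L * (L + 1) < j * 2 := (PySem.Int.floordiv_lt_iff_lt_mul (by omega)).mp h
  have h3 : L < 2 * j := by nlinarith [mul_self_nonneg L]
  omega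

def compute_l_j (j : Int) : Int := compute_l_j_loop j 1

def compute_y_j (j k : Int) : Int × Int :=
  let L := compute_l_j j
  let residue := PySem.Int.mod (2 + j + L - 1) L
  let candidates := (PySem.List.pyRange 1 (k + 1) 1).filter (fun y => PySem.Int.mod y L == residue)
  -- max(candidates) raises ValueError on an empty list; unreachable from construct_T_int's calls
  -- (there 1 ≤ j ≤ k, which makes candidates nonempty), so the .getD default is never used
  ((PySem.List.max? candidates (fun y => y)).getD 0, L)

def construct_T_int (k : Int) (substitute : String) : List Int :=
  let part1 := (PySem.List.pyRange 1 (k + 1) 1).foldl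
      (fun acc i => (acc ++ PySem.List.pyRange 1 (i + 1) 1) ++ [k + i]) []
  let part2 := (PySem.List.pyRange 1 (k + 1) 1).foldl
      (fun acc j =>
        let yj := (compute_y_j j k).1
        let core := PySem.List.pyRange 1 (yj + 1) 1 ++ [k + j]
        if substitute != "none" && j == 1 then
          let first_core :=
            if substitute == "insert" then
              -- core[0] raises IndexError on an empty list; core always ends in [k+j], so the default is never used
              [(PySem.List.pyGet? core 0).getD 0, SENTINEL] ++ PySem.List.slice core (some 1) none
            else if substitute == "delete" then
              PySem.List.slice core (some 1) none
            else
              [SENTINEL] ++ PySem.List.slice core (some 1) none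
          ((acc ++ first_core) ++ [2 * k + j]) ++ core
        else
          ((acc ++ core) ++ [2 * k + j]) ++ core) []
  part1 ++ part2

-- ===== PORT B =====
def construct_T_int_alt (k : Int) (substitute : String) : List Int :=
  let s1 := (PySem.List.pyRange 1 (k + 1) 1).foldl
      (fun (st : List Int × List Int) i =>
        let pre := st.2 ++ [i]
        ((st.1 ++ pre) ++ [k + i], pre)) ([], [])
  let s2 := (PySem.List.pyRange 1 (k + 1) 1).foldl
      (fun (st : List Int × Int × Int) j =>
        let L := if st.2.2 < j then st.2.1 + 1 else st.2.1
        let t := if st.2.2 < j then st.2.2 + L else st.2.2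
        let residue := PySem.Int.mod (1 + j) L
        let yj := k - PySem.Int.mod (k - residue) L
        let core := PySem.List.pyRange 1 (yj + 1) 1 ++ [k + j]
        let head :=
          if j == 1 && substitute != "none" then
            if substitute == "delete" then PySem.List.slice core (some 1) none
            else if substitute == "insert" then
              [(PySem.List.pyGet? core 0).getD 0, SENTINEL] ++ PySem.List.slice core (some 1) none
            else [SENTINEL] ++ PySem.List.slice core (some 1) none
          else core
        (((st.1 ++ head) ++ [2 * k + j]) ++ core, L, t)) ([], 1, 1)
  s1.1 ++ s2.1

-- ===== PRECONDITION & SPEC =====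
def Spec_construct_T_int (k : Int) (substitute : String) (out : List Int) : Prop := out = construct_T_int_alt k substitute
instance (k : Int) (substitute : String) (out : List Int) : Decidable (Spec_construct_T_int k substitute out) := by unfold Spec_construct_T_int; infer_instance

-- ===== CLAIM (what is proved, stated in full; the proofs are below) =====
def Claim_equal_construct_T_int : Prop := ∀ (k : Int) (substitute : String), Dom_construct_T_int k substitute → Spec_construct_T_int k substitute (construct_T_int k substitute)

-- ===== LEMMAS AND PROOFS =====

-- proof-only helpers: the per-iteration chunks the part-(2)/part-(1) loops append,
-- and the characterization of A's compute_l_j as the least L ≥ 1 with 2j ≤ L(L+1)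
def blockA (k : Int) (substitute : String) (j : Int) : List Int :=
  let yj := (compute_y_j j k).1
  let core := PySem.List.pyRange 1 (yj + 1) 1 ++ [k + j]
  (if substitute != "none" && j == 1 then
     (if substitute == "insert" then
        [(PySem.List.pyGet? core 0).getD 0, SENTINEL] ++ PySem.List.slice core (some 1) none
      else if substitute == "delete" then PySem.List.slice core (some 1) none
      else [SENTINEL] ++ PySem.List.slice core (some 1) none)
   else core) ++ ([2 * k + j] ++ core)

def blockP1 (k : Int) (i : Int) : List Int := PySem.List.pyRange 1 (i + 1) 1 ++ [k + i]

def lChar (j L : Int) : Prop := 1 ≤ L ∧ (L - 1) * L < 2 * j ∧ 2 * j ≤ L * (L + 1)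

lemma loop_char (j L : Int) : 1 ≤ L → (L - 1) * L < 2 * j → lChar j (compute_l_j_loop j L) := by
  fun_induction compute_l_j_loop j L with
  | case1 L h ih =>
    intro h1 h2
    have hlt : L * (L + 1) < j * 2 := (PySem.Int.floordiv_lt_iff_lt_mul (by omega)).mp h
    exact ih (by omega) (by nlinarith)
  | case2 L h =>
    intro h1 h2
    have hge : j ≤ PySem.Int.floordiv (L * (L + 1)) 2 := by omega
    have := (PySem.Int.le_floordiv_iff_mul_le (by omega)).mp hge
    exact ⟨h1, h2, by nlinarith⟩

lemma lChar_unique (j L M : Int) (hL : lChar j L) (hM : lChar j M) : L = M := by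
  obtain ⟨h1, h2, h3⟩ := hL
  obtain ⟨h4, h5, h6⟩ := hM
  by_contra hne
  rcases lt_or_gt_of_ne hne with h | h
  · nlinarith
  · nlinarith

lemma compute_l_j_char (j : Int) (hj : 1 ≤ j) : lChar j (compute_l_j j) :=
  loop_char j 1 le_rfl (by omega)

lemma compute_l_j_zero : compute_l_j 0 = 1 := by
  rw [compute_l_j, compute_l_j_loop]
  norm_num [PySem.Int.floordiv]

lemma step_L (j L t : Int) (hj : 1 ≤ j) (hL : L = compute_l_j (j - 1)) (ht : 2 * t = L * (L + 1)) :
    (if t < j then L + 1 else L) = compute_l_j j ∧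
    2 * (if t < j then t + (L + 1) else t) = compute_l_j j * (compute_l_j j + 1) := by
  have hchar : lChar (j - 1) L ∨ (j = 1 ∧ L = 1) := by
    rcases eq_or_lt_of_le hj with h | h
    · right; exact ⟨h.symm, by rw [hL, ← h]; norm_num; exact compute_l_j_zero⟩
    · left; rw [hL]; exact compute_l_j_char (j - 1) (by omega)
  have hcj : lChar j (if t < j then L + 1 else L) := by
    rcases hchar with ⟨h1, h2, h3⟩ | ⟨hj1, hL1⟩
    · by_cases hc : t < j
      · simp only [if_pos hc]
        refine ⟨by omega, by nlinarith, by nlinarith⟩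
      · simp only [if_neg hc]
        refine ⟨h1, by nlinarith, by nlinarith⟩
    · subst hj1; subst hL1
      have : ¬ (t < 1) := by omega
      simp only [if_neg this]
      refine ⟨le_rfl, by norm_num, by omega⟩
  have := lChar_unique j _ _ hcj (compute_l_j_char j hj)
  refine ⟨this, ?_⟩
  rw [← this]
  by_cases hc : t < j
  · rw [if_pos hc, if_pos hc]; linear_combination ht
  · rw [if_neg hc, if_neg hc]; exact ht

lemma y_eq (j k : Int) (hj : 1 ≤ j) (hjk : j ≤ k) :
    (compute_y_j j k).1 =
      k - PySem.Int.mod (k - PySem.Int.mod (1 + j) (compute_l_j j)) (compute_l_j j) := by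
  obtain ⟨h1, h2, h3⟩ := compute_l_j_char j hj
  set L := compute_l_j j with hLdef
  have hLpos : 0 < L := h1
  have hLk : L ≤ k := by nlinarith
  have hmod : ∀ a : Int, PySem.Int.mod a L = a % L := fun a => PySem.Int.mod_eq_emod_of_pos hLpos
  set r := (1 + j) % L with hr
  have hr0 : 0 ≤ r := Int.emod_nonneg _ (by omega)
  have hrL : r < L := Int.emod_lt_of_pos _ hLpos
  have hres : PySem.Int.mod (2 + j + L - 1) L = r := by
    rw [hmod, hr]
    have he : 2 + j + L - 1 = (1 + j) + L := by ring
    rw [he, Int.add_emod_right]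
  have hm0 : 0 ≤ (k - r) % L := Int.emod_nonneg _ (by omega)
  have hmL : (k - r) % L < L := Int.emod_lt_of_pos _ hLpos
  set y0 := k - (k - r) % L with hy0
  have hq : (k - r) % L + L * ((k - r) / L) = k - r := Int.emod_add_mul_ediv _ _
  have hy0r : y0 = r + L * ((k - r) / L) := by omega
  have hy0mod : y0 % L = r := by
    rw [hy0r, Int.add_mul_emod_self_left]
    exact Int.emod_eq_of_lt hr0 hrL
  have hq0 : 0 ≤ (k - r) / L := Int.ediv_nonneg (by omega) (by omega)
  have hy01 : 1 ≤ y0 := by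
    rcases eq_or_lt_of_le hr0 with h | h
    · have hq1 : 1 ≤ (k - r) / L := by
        rw [Int.le_ediv_iff_mul_le hLpos]
        omega
      nlinarith
    · nlinarith
  simp only [compute_y_j]
  rw [← hLdef, hres, hmod (k - PySem.Int.mod (1 + j) L), hmod (1 + j), ← hr]
  have hmem : y0 ∈ (PySem.List.pyRange 1 (k + 1) 1).filter (fun y => PySem.Int.mod y L == r) := by
    rw [List.mem_filter]
    refine ⟨(PySem.List.mem_pyRange_one).mpr ⟨by omega, by omega⟩, ?_⟩
    simp [hmod, hy0mod]
  have hub : ∀ y ∈ (PySem.List.pyRange 1 (k + 1) 1).filter (fun y => PySem.Int.mod y L == r), y ≤ y0 := by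
    intro y hy
    rw [List.mem_filter] at hy
    obtain ⟨hyr, hyp⟩ := hy
    rw [PySem.List.mem_pyRange_one] at hyr
    have hymod : y % L = r := by simpa [hmod] using hyp
    have hdvd : L ∣ (y - y0) := by
      apply Int.dvd_of_emod_eq_zero
      rw [Int.sub_emod, hymod, hy0mod]
      simp
    obtain ⟨c, hc⟩ := hdvd
    by_contra hgt
    rw [not_le] at hgt
    have hc1 : 1 ≤ c := by nlinarith
    have : y0 + L ≤ y := by nlinarith
    omega
  cases hmax : PySem.List.max? ((PySem.List.pyRange 1 (k + 1) 1).filter (fun y => PySem.Int.mod y L == r)) (fun y => y) with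
  | none =>
      rw [PySem.List.max?_eq_none_iff] at hmax
      rw [hmax] at hmem
      simp at hmem
  | some m =>
      have hm1 := PySem.List.max?_mem hmax
      have h5 := PySem.List.max?_isMax hmax y0 hmem
      have h6 := hub m hm1
      have hmy : m = y0 := le_antisymm h6 h5
      simp only [Option.getD_some]
      rw [hmy]

lemma A_eq (k : Int) (substitute : String) :
    construct_T_int k substitute =
      (PySem.List.pyRange 1 (k + 1) 1).flatMap (blockP1 k) ++
      (PySem.List.pyRange 1 (k + 1) 1).flatMap (blockA k substitute) := by
  simp only [construct_T_int]
  congr 1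
  · have hf : (fun (acc : List Int) (i : Int) => (acc ++ PySem.List.pyRange 1 (i + 1) 1) ++ [k + i])
        = (fun acc i => acc ++ blockP1 k i) := by
      funext acc i; simp [blockP1, List.append_assoc]
    rw [hf, PySem.List.foldl_append_eq_flatMap, List.nil_append]
  · have hf : (fun (acc : List Int) (j : Int) =>
        let yj := (compute_y_j j k).1
        let core := PySem.List.pyRange 1 (yj + 1) 1 ++ [k + j]
        if substitute != "none" && j == 1 then
          let first_core :=
            if substitute == "insert" then
              [(PySem.List.pyGet? core 0).getD 0, SENTINEL] ++ PySem.List.slice core (some 1) none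
            else if substitute == "delete" then
              PySem.List.slice core (some 1) none
            else
              [SENTINEL] ++ PySem.List.slice core (some 1) none
          ((acc ++ first_core) ++ [2 * k + j]) ++ core
        else
          ((acc ++ core) ++ [2 * k + j]) ++ core)
        = (fun acc j => acc ++ blockA k substitute j) := by
      funext acc j
      simp only [blockA]
      split_ifs <;> simp_all [List.append_assoc]
    rw [hf, PySem.List.foldl_append_eq_flatMap, List.nil_append]

lemma block_eq (k : Int) (s : String) (j : Int) (hj : 1 ≤ j) (hjk : j ≤ k) :
    (let residue := PySem.Int.mod (1 + j) (compute_l_j j)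
     let yj := k - PySem.Int.mod (k - residue) (compute_l_j j)
     let core := PySem.List.pyRange 1 (yj + 1) 1 ++ [k + j]
     let head :=
       if j == 1 && s != "none" then
         if s == "delete" then PySem.List.slice core (some 1) none
         else if s == "insert" then
           [(PySem.List.pyGet? core 0).getD 0, SENTINEL] ++ PySem.List.slice core (some 1) none
         else [SENTINEL] ++ PySem.List.slice core (some 1) none
       else core
     (head ++ [2 * k + j]) ++ core) = blockA k s j := by
  have hy := (y_eq j k hj hjk).symm
  simp only [blockA, ← hy]
  split_ifs with h1 h2 h3 h4 h5 h6 h7 <;> simp_all [List.append_assoc, Bool.and_comm]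

lemma B1_inv (k : Int) (n : Nat) :
    (PySem.List.pyRange 1 ((n : Int) + 1) 1).foldl
        (fun (st : List Int × List Int) i =>
          let pre := st.2 ++ [i]
          ((st.1 ++ pre) ++ [k + i], pre)) ([], []) =
      ((PySem.List.pyRange 1 ((n : Int) + 1) 1).flatMap (blockP1 k),
        PySem.List.pyRange 1 ((n : Int) + 1) 1) := by
  induction n with
  | zero =>
    rw [PySem.List.pyRange_one_eq_nil (by omega)]
    simp
  | succ n ih =>
    have hsr : PySem.List.pyRange 1 ((↑(n + 1) : Int) + 1) 1
        = PySem.List.pyRange 1 ((n : Int) + 1) 1 ++ [(n : Int) + 1] := by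
      have h := PySem.List.pyRange_one_succ_right (a := 1) (b := (n : Int) + 1) (by omega)
      push_cast
      exact h
    rw [hsr, List.foldl_append, ih]
    simp [blockP1, List.append_assoc,
      PySem.List.pyRange_one_succ_right (a := 1) (b := (n : Int) + 1) (by omega)]

lemma B2_inv (k : Int) (substitute : String) (n : Nat) (hn : (n : Int) ≤ k) :
    (PySem.List.pyRange 1 ((n : Int) + 1) 1).foldl
        (fun (st : List Int × Int × Int) j =>
          let L := if st.2.2 < j then st.2.1 + 1 else st.2.1
          let t := if st.2.2 < j then st.2.2 + L else st.2.2
          let residue := PySem.Int.mod (1 + j) L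
          let yj := k - PySem.Int.mod (k - residue) L
          let core := PySem.List.pyRange 1 (yj + 1) 1 ++ [k + j]
          let head :=
            if j == 1 && substitute != "none" then
              if substitute == "delete" then PySem.List.slice core (some 1) none
              else if substitute == "insert" then
                [(PySem.List.pyGet? core 0).getD 0, SENTINEL] ++ PySem.List.slice core (some 1) none
              else [SENTINEL] ++ PySem.List.slice core (some 1) none
            else core
          (((st.1 ++ head) ++ [2 * k + j]) ++ core, L, t)) ([], 1, 1) =
      ((PySem.List.pyRange 1 ((n : Int) + 1) 1).flatMap (blockA k substitute),
        compute_l_j (n : Int), (compute_l_j (n : Int) * (compute_l_j (n : Int) + 1)) / 2) := by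
  induction n with
  | zero =>
    rw [PySem.List.pyRange_one_eq_nil (by omega)]
    simp [compute_l_j_zero]
  | succ n ih =>
    have hn' : (n : Int) ≤ k := by push_cast at hn ⊢; omega
    have hjk : ((n : Int) + 1) ≤ k := by push_cast at hn; omega
    have hsr : PySem.List.pyRange 1 ((↑(n + 1) : Int) + 1) 1
        = PySem.List.pyRange 1 ((n : Int) + 1) 1 ++ [(n : Int) + 1] := by
      have h := PySem.List.pyRange_one_succ_right (a := 1) (b := (n : Int) + 1) (by omega)
      push_cast
      exact h
    have heven : 2 * ((compute_l_j (n : Int) * (compute_l_j (n : Int) + 1)) / 2)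
        = compute_l_j (n : Int) * (compute_l_j (n : Int) + 1) := by
      obtain ⟨r, hr⟩ := Int.even_mul_succ_self (compute_l_j (n : Int))
      omega
    have hprev : compute_l_j (n : Int) = compute_l_j (((n : Int) + 1) - 1) := by norm_num
    have hstep := step_L ((n : Int) + 1) (compute_l_j (n : Int))
      ((compute_l_j (n : Int) * (compute_l_j (n : Int) + 1)) / 2) (by omega) hprev heven
    rw [hsr, List.foldl_append, ih hn']
    simp only [List.foldl_cons, List.foldl_nil]
    rw [hstep.1]
    have hcast : compute_l_j (↑(n + 1) : Int) = compute_l_j ((n : Int) + 1) := by push_cast; rfl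
    simp only [Prod.mk.injEq]
    refine ⟨?_, ?_, ?_⟩
    · rw [List.flatMap_append, List.flatMap_singleton, ← block_eq k substitute ((n : Int) + 1) (by omega) hjk]
      simp [List.append_assoc]
    · rw [hcast]
    · have h2 := hstep.2
      rw [hcast]
      omega

lemma main_eq (k : Int) (s : String) : construct_T_int k s = construct_T_int_alt k s := by
  rw [A_eq]
  simp only [construct_T_int_alt]
  by_cases hk : k ≤ 0
  · rw [PySem.List.pyRange_one_eq_nil (by omega)]
    simp
  · obtain ⟨n, hn⟩ : ∃ n : Nat, k = (n : Int) := ⟨k.toNat, by omega⟩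
    subst hn
    rw [B1_inv (↑n) n, B2_inv (↑n) s n le_rfl]

-- ===== VERDICT (by name: the statement is the Claim_ definition above) =====
theorem construct_T_int_spec : Claim_equal_construct_T_int := by
  intro k substitute _
  unfold Spec_construct_T_int
  exact main_eq k substitute
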